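-- pv_equiv track=rewrite | github.com/Dokey2017capstone/Okey_spacing | CRF/2_train.py | feature_function
-- ===== SOURCE A (Python) =====
-- def feature_function(pairs):        #특징함수
--     features = []               # [[나,3:는],[는,2:나,3:먹],[먹,1:나,2:는,3:다],[는,1:는,2:먹,3:다],[다,1:먹,2:는]]
--
--     for i in range(len(pairs)):
--         syllable_feature = []  # [먹,1:나,2:는,3:다]
--         syllable_feature.append(pairs[i][0])
--
--         if i > 1:
--             syllable_feature.append('1:' + pairs[i - 2][0])
--         if i > 0:
--             syllable_feature.append('2:' + pairs[i - 1][0])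
--         if i < len(pairs) - 1:
--             syllable_feature.append('3:' + pairs[i + 1][0])
--
--         features.append(syllable_feature)
--
--     return features
-- ===== SOURCE B (Python) =====
-- def feature_function(pairs):
--     heads = [p[0] for p in pairs]
--     n = len(heads)
--     f1 = [[]] * 2 + [['1:' + h] for h in heads[:n - 2]]
--     f2 = [[]] + [['2:' + h] for h in heads[:n - 1]]
--     f3 = [['3:' + h] for h in heads[1:]] + [[]]
--     return [[h] + a + b + c for h, a, b, c in zip(heads, f1, f2, f3)]
-- ===== Notes on version B (the rewrite author's own statement) =====
-- stated objective: alternative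
-- what changed: Replaces the index-arithmetic loop with its per-position bounds checks by precomputing three shifted feature columns (prev-prev, prev, next) and zipping them with the syllable list position-wise.
import Mathlib
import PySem

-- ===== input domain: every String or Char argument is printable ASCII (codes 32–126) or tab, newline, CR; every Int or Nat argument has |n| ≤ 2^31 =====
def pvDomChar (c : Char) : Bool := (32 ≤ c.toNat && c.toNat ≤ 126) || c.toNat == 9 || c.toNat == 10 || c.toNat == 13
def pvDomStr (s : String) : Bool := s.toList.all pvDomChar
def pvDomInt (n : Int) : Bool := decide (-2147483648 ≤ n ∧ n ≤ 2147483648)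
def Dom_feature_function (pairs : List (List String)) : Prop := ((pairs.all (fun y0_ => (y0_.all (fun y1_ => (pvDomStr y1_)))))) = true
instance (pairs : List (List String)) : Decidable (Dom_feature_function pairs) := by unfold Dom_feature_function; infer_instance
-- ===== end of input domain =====

-- A computes features[i] = [pairs[i][0]] plus labelled neighbour syllables by index arithmetic
-- inside one loop; B instead builds the three shifted neighbour columns up front and zips them.
-- Equivalence of the return values is proved on Pre_ (all inner lists nonempty; else A raises).

-- ===== PORT A =====
-- pairs[i][0] (under Pre_ every inner list is nonempty, so headD is exact there)
def pvPGet (pairs : List (List String)) (i : Int) : String :=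
  (PySem.List.pyGetD pairs i []).headD ""

def feature_function (pairs : List (List String)) : List (List String) :=
  (PySem.List.pyRange 0 pairs.length 1).foldl (fun features i =>
    let sf := [pvPGet pairs i]
    let sf := if i > 1 then sf ++ ["1:" ++ pvPGet pairs (i - 2)] else sf
    let sf := if i > 0 then sf ++ ["2:" ++ pvPGet pairs (i - 1)] else sf
    let sf := if i < (pairs.length : Int) - 1 then sf ++ ["3:" ++ pvPGet pairs (i + 1)] else sf
    features ++ [sf]) []

-- ===== PORT B =====
def feature_function_alt (pairs : List (List String)) : List (List String) :=
  let heads := pairs.map (fun p => p.headD "")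
  let n := heads.length
  let f1 := [[], []] ++ (heads.take (n - 2)).map (fun h => ["1:" ++ h])
  let f2 := [[]] ++ (heads.take (n - 1)).map (fun h => ["2:" ++ h])
  let f3 := (heads.drop 1).map (fun h => ["3:" ++ h]) ++ [[]]
  (heads.zip (f1.zip (f2.zip f3))).map (fun x => [x.1] ++ x.2.1 ++ x.2.2.1 ++ x.2.2.2)

-- ===== PRECONDITION & SPEC =====
-- Pre_ excludes inputs containing an empty inner list: there Python A raises IndexError on pairs[i][0].
def Pre_feature_function (pairs : List (List String)) : Prop := ∀ p ∈ pairs, p ≠ []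
instance (pairs : List (List String)) : Decidable (Pre_feature_function pairs) := by unfold Pre_feature_function; infer_instance
def pvWitness_feature_function : List (List String) := [["ab"], ["c", "x"], ["d"]]

def Spec_feature_function (pairs : List (List String)) (out : List (List String)) : Prop := out = feature_function_alt pairs
instance (pairs : List (List String)) (out : List (List String)) : Decidable (Spec_feature_function pairs out) := by unfold Spec_feature_function; infer_instance

-- ===== CLAIM (what is proved, stated in full; the proofs are below) =====
def Claim_equal_feature_function : Prop := ∀ (pairs : List (List String)), Dom_feature_function pairs → Pre_feature_function pairs → Spec_feature_function pairs (feature_function pairs)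

-- ===== LEMMAS AND PROOFS =====

-- the common position-wise value, phrased over the head list
def pvGather (heads : List String) (k : Nat) : List String :=
  [heads.getD k ""]
    ++ (if 2 ≤ k then [("1:" ++ heads.getD (k - 2) "")] else [])
    ++ (if 1 ≤ k then [("2:" ++ heads.getD (k - 1) "")] else [])
    ++ (if k + 1 < heads.length then [("3:" ++ heads.getD (k + 1) "")] else [])

theorem pvPGet_eq_heads (pairs : List (List String)) (k : Nat) :
    pvPGet pairs (k : Int) = (pairs.map (fun p => p.headD "")).getD k "" := by
  simp [pvPGet, List.getD]
  cases h : pairs[k]? <;> simp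

theorem a_eq_map (pairs : List (List String)) :
    feature_function pairs =
      (List.range pairs.length).map (pvGather (pairs.map (fun p => p.headD ""))) := by
  simp only [feature_function]
  rw [PySem.List.pyRange_zero_natCast, List.foldl_map]
  rw [PySem.List.foldl_append_singleton_eq_map, List.nil_append]
  apply List.map_congr_left
  intro k hk
  rw [List.mem_range] at hk
  have hlen : (pairs.map (fun p => p.headD "")).length = pairs.length := by simp
  have c1 : ((k : Int) > 1) ↔ 2 ≤ k := by omega
  have c2 : ((k : Int) > 0) ↔ 1 ≤ k := by omega
  have c3 : ((k : Int) < (pairs.length : Int) - 1) ↔ k + 1 < pairs.length := by omega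
  simp only [pvGather, hlen, c1, c2, c3]
  split_ifs <;>
    first
    | omega
    | (simp only [show ((k : Int) - 2) = ((k - 2 : Nat) : Int) from by omega,
          show ((k : Int) - 1) = ((k - 1 : Nat) : Int) from by omega,
          show ((k : Int) + 1) = ((k + 1 : Nat) : Int) from by omega, pvPGet_eq_heads]; try simp
       done)
    | (simp only [show ((k : Int) - 1) = ((k - 1 : Nat) : Int) from by omega,
          show ((k : Int) + 1) = ((k + 1 : Nat) : Int) from by omega, pvPGet_eq_heads]; try simp
       done)
    | (simp only [show ((k : Int) - 1) = ((k - 1 : Nat) : Int) from by omega,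
          pvPGet_eq_heads]; try simp
       done)
    | (simp only [show ((k : Int) + 1) = ((k + 1 : Nat) : Int) from by omega,
          pvPGet_eq_heads]; try simp
       done)
    | (simp only [pvPGet_eq_heads]; try simp
       done)

theorem col1 (heads : List String) (k : Nat) (hk : k < heads.length)
    (hb : k < ([([] : List String), []] ++ (heads.take (heads.length - 2)).map (fun h => ["1:" ++ h])).length) :
    ([([] : List String), []] ++ (heads.take (heads.length - 2)).map (fun h => ["1:" ++ h]))[k] =
      if 2 ≤ k then [("1:" ++ heads.getD (k - 2) "")] else [] := by
  by_cases h : 2 ≤ k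
  · rw [List.getElem_append_right (by simpa using h)]
    simp [h, List.getElem_take]
    rw [List.getElem?_eq_getElem (by omega)]; rfl
  · rw [List.getElem_append_left (by simpa using by omega)]
    have : k = 0 ∨ k = 1 := by omega
    rcases this with rfl | rfl <;> simp [h]

theorem col2 (heads : List String) (k : Nat) (hk : k < heads.length)
    (hb : k < ([([] : List String)] ++ (heads.take (heads.length - 1)).map (fun h => ["2:" ++ h])).length) :
    ([([] : List String)] ++ (heads.take (heads.length - 1)).map (fun h => ["2:" ++ h]))[k] =
      if 1 ≤ k then [("2:" ++ heads.getD (k - 1) "")] else [] := by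
  by_cases h : 1 ≤ k
  · rw [List.getElem_append_right (by simpa using h)]
    simp [h, List.getElem_take]
    rw [List.getElem?_eq_getElem (by omega)]; rfl
  · rw [List.getElem_append_left (by simpa using by omega)]
    have : k = 0 := by omega
    subst this; simp

theorem col3 (heads : List String) (k : Nat) (hk : k < heads.length)
    (hb : k < ((heads.drop 1).map (fun h => ["3:" ++ h]) ++ [([] : List String)]).length) :
    ((heads.drop 1).map (fun h => ["3:" ++ h]) ++ [([] : List String)])[k] =
      if k + 1 < heads.length then [("3:" ++ heads.getD (k + 1) "")] else [] := by
  by_cases h : k + 1 < heads.length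
  · rw [List.getElem_append_left (by simp; omega)]
    simp [h]
  · rw [List.getElem_append_right (by simp; omega)]
    simp [h]

theorem b_eq_map (pairs : List (List String)) :
    feature_function_alt pairs =
      (List.range pairs.length).map (pvGather (pairs.map (fun p => p.headD ""))) := by
  simp only [feature_function_alt]
  have hlen : (pairs.map (fun p => p.headD "")).length = pairs.length := by simp
  apply List.ext_getElem
  · simp; omega
  · intro k h1 h2
    simp only [List.getElem_map, List.getElem_zip, List.getElem_range]
    have hk : k < pairs.length := by simpa using h2
    have hkh : k < (pairs.map (fun p => p.headD "")).length := by simpa using hk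
    rw [col1 _ k hkh, col2 _ k hkh, col3 _ k hkh]
    simp [pvGather]
    rw [List.getElem?_eq_getElem hk]; rfl

-- ===== VERDICT (by name: the statement is the Claim_ definition above) =====
theorem feature_function_spec : Claim_equal_feature_function := by
  intro pairs _ _
  unfold Spec_feature_function
  rw [a_eq_map, b_eq_map]
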